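-- pv_equiv track=rewrite | github.com/MatthewDaws/CodeJam | 2013_1a/c.py | probability_all_products
-- ===== SOURCE A (Python) =====
-- import itertools
-- import math
-- from collections import namedtuple
--
-- def choices(N, M):
--     """General x = [x2 ... xM] where we have x2 lots of 2, x3 lots of 3,
--     and so on.  So 0 <= x2 and \sum xi = N"""
--     #yield from itertools.combinations(range(2, M+1), N)
--     # Use stars and bars method
--     allbars = itertools.combinations( range(1,N+M-1), M-2 )
--     for bars in allbars:
--         bars = [0] + list(bars) + [N+M-1]
--         yi = [ y-x for x, y in zip(bars, bars[1:]) ]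
--         yield [ y-1 for y in yi ]
--
-- ProdFreqPair = namedtuple("ProdFreqPair", ["product", "freq"])
--
-- def prodgreqs_base(A):
--     """Given A = [x2 ... xM] where set A contains x2 lots of 2, x3 lots of 3, etc.
--     Yields all ProdFreqPair's
--     This algorithm does _not_ ensure that the products returned are distinct..."""
--     choices = [ list(range(xi+1)) for xi in A ]
--     M = len(choices) + 1
--     for yi in itertools.product(*choices):
--         prod, freq = 1, 1
--         for a, y, x in zip(range(2, M+1), yi, A):
--             prod *= a ** y
--             freq *= math.factorial(x) // math.factorial(y) // math.factorial(x-y)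
--         yield ProdFreqPair(prod, freq)
--
-- def prodgreqs(A):
--     """Corrects the above by merging entries."""
--     pairs = list(prodgreqs_base(A))
--     pairs.sort(key = lambda pfp : pfp.product)
--     current_prod = -1
--     current_freq = 0
--     for pfp in pairs:
--         if current_prod == -1:
--             current_prod = pfp.product
--             current_freq = pfp.freq
--         else:
--             if current_prod == pfp.product:
--                 current_freq += pfp.freq
--             else:
--                 yield ProdFreqPair(current_prod, current_freq)
--                 current_prod = pfp.product
--                 current_freq = pfp.freq
--     yield ProdFreqPair(current_prod, current_freq)
--
-- def probability_all_products(N, M):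
--     """Returns dictionary prod : pairs (A, f) where A is possible A set, and f is relative frequency of seeing
--     this product for this A."""
--     Achoices = list( choices(N, M) )
--     products = dict()
--     for A in Achoices:
--         for pfp in prodgreqs(A):
--             if pfp.product not in products:
--                 products[pfp.product] = []
--             products[pfp.product].append( (tuple(A), pfp.freq) )
--     return products
-- ===== SOURCE B (Python) =====
-- import itertools
-- import math
--
-- def probability_all_products(N, M):
--     """One pass per A: accumulate product -> summed frequency in a dict
--     (no intermediate pair list, no sort-and-merge scan), then emit the
--     merged entries in ascending product order."""
--     products = {}
--     for bars in itertools.combinations(range(1, N + M - 1), M - 2):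
--         b = [0] + list(bars) + [N + M - 1]
--         A = tuple(y - x - 1 for x, y in zip(b, b[1:]))
--         counts = {}
--         for ys in itertools.product(*(range(x + 1) for x in A)):
--             prod, freq = 1, 1
--             for i, (y, x) in enumerate(zip(ys, A)):
--                 prod *= (i + 2) ** y
--                 freq *= math.comb(x, y)
--             counts[prod] = counts.get(prod, 0) + freq
--         for p in sorted(counts):
--             products.setdefault(p, []).append((A, counts[p]))
--     return products
-- ===== Notes on version B (the rewrite author's own statement) =====
-- stated objective: faster
-- what changed: Per partition A the build-list/sort/adjacent-merge pipeline (prodgreqs_base + prodgreqs) is replaced by a single dict pass accumulating product -> summed frequency (binomials via math.comb instead of the factorial quotient), emitting each A's merged entries by sorting only the distinct products.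
-- intended difference: For N < 0 with M = 2 the only choice tuple is the degenerate (N,) yielding no products, where A returns {-1: [((N,), 0)]} - the -1/0 sentinel of its merge loop leaking out - while B returns {}, the intended empty result. — e.g. on probability_all_products(-1, 2): A returns [(-1, [([-1], 0)])], B returns []
import Mathlib
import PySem

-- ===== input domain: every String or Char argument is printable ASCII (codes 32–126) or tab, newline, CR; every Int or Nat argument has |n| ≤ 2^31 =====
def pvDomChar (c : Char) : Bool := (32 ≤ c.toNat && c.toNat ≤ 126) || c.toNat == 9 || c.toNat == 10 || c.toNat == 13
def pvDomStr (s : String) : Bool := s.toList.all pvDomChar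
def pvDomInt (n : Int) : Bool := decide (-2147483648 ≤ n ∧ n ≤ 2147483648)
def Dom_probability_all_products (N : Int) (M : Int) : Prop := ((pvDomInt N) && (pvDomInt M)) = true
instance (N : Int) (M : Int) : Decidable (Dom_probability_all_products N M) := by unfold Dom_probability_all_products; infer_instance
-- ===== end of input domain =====

-- B replaces A's per-partition build-list/sort/adjacent-merge with a single dict pass
-- (product -> summed frequency, binomials via math.comb), emitting the merged entries in
-- ascending product order.

-- ===== PORT A =====

-- itertools.product(*lists) (both Pythons call it; not in PySem): rightmost coordinate
-- varies fastest — exact hand port.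
def pyProd : List (List Int) → List (List Int)
  | [] => [[]]
  | l :: ls => l.flatMap (fun x => (pyProd ls).map (x :: ·))

-- math.factorial(n); every call site passes 0 ≤ n, where this is exact.
def pyFact (n : Int) : Int := (Nat.factorial n.toNat : Int)

-- itertools.combinations(xs, r) = PySem.List.combinations xs r (proved in
-- pyCombinations_eq below); written with CPython's r > len(xs) short-circuit so the
-- port evaluates in time proportional to its output, as the C implementation does.
def pyCombinations : List Int → Nat → List (List Int)
  | _, 0 => [[]]
  | [], _ + 1 => []
  | x :: t, r + 1 =>
      if t.length + 1 < r + 1 then []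
      else (pyCombinations t r).map (x :: ·) ++ pyCombinations t (r + 1)

-- choices(N, M): stars and bars.  (M-2).toNat is a totality guard: for M < 2 Python's
-- combinations raises ValueError, excluded by Pre_.
def choicesA (N : Int) (M : Int) : List (List Int) :=
  (pyCombinations (PySem.List.pyRange 1 (N + M - 1) 1) (M - 2).toNat).map
    (fun bars =>
      let b := [0] ++ bars ++ [N + M - 1]
      let yi := (b.zip b.tail).map (fun xy => xy.2 - xy.1)
      yi.map (fun y => y - 1))

-- prodgreqs_base(A): the list of ProdFreqPair (the generator, consumed in order).
-- a ** y ported as a ^ y.toNat (exact: y comes from range(xi+1), so 0 ≤ y).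
def basePairsA (A : List Int) : List (Int × Int) :=
  let choices := A.map (fun xi => PySem.List.pyRange 0 (xi + 1) 1)
  let M : Int := (choices.length : Int) + 1
  (pyProd choices).map (fun yi =>
    ((PySem.List.pyRange 2 (M + 1) 1).zip (yi.zip A)).foldl
      (fun pf ayx =>
        (pf.1 * ayx.1 ^ ayx.2.1.toNat,
         pf.2 * PySem.Int.floordiv (PySem.Int.floordiv (pyFact ayx.2.2) (pyFact ayx.2.1))
                  (pyFact (ayx.2.2 - ayx.2.1))))
      (1, 1))

-- prodgreqs(A): sort by product, then the sentinel merge loop; final yield appended.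
def mergeA (pairs : List (Int × Int)) : List (Int × Int) :=
  let s := PySem.List.sorted pairs (fun p => p.1) false
  let st := s.foldl
    (fun (st : Int × Int × List (Int × Int)) pfp =>
      if st.1 = -1 then (pfp.1, pfp.2, st.2.2)
      else if st.1 = pfp.1 then (st.1, st.2.1 + pfp.2, st.2.2)
      else (pfp.1, pfp.2, st.2.2 ++ [(st.1, st.2.1)]))
    (-1, 0, [])
  st.2.2 ++ [(st.1, st.2.1)]

def probability_all_products (N : Int) (M : Int) : List (Int × List (List Int × Int)) :=
  ((choicesA N M).foldl
    (fun (products : PySem.Dict Int (List (List Int × Int))) A =>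
      (mergeA (basePairsA A)).foldl
        (fun products pfp =>
          let products := if products.contains pfp.1 then products else products.insert pfp.1 []
          products.insert pfp.1 (products.getD pfp.1 [] ++ [(A, pfp.2)]))
        products)
    PySem.Dict.empty).items

-- ===== PORT B =====

-- math.comb(x, y); every call site passes 0 ≤ y ≤ x, where this is exact.
def pyComb (x : Int) (y : Int) : Int := (Nat.choose x.toNat y.toNat : Int)

def probability_all_products_alt (N : Int) (M : Int) : List (Int × List (List Int × Int)) :=
  ((pyCombinations (PySem.List.pyRange 1 (N + M - 1) 1) (M - 2).toNat).foldl
    (fun (products : PySem.Dict Int (List (List Int × Int))) bars =>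
      let b := [0] ++ bars ++ [N + M - 1]
      let A := (b.zip b.tail).map (fun xy => xy.2 - xy.1 - 1)
      let counts := (pyProd (A.map (fun x => PySem.List.pyRange 0 (x + 1) 1))).foldl
        (fun (counts : PySem.Dict Int Int) ys =>
          let pf := (PySem.List.enumerate (ys.zip A) 0).foldl
            (fun pf iyx => (pf.1 * (iyx.1 + 2) ^ iyx.2.1.toNat, pf.2 * pyComb iyx.2.2 iyx.2.1))
            (1, 1)
          counts.insert pf.1 (counts.getD pf.1 0 + pf.2))
        PySem.Dict.empty
      (PySem.List.sorted counts.keys (fun x => x) false).foldl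
        (fun products p =>
          let products := products.setdefault p []
          -- counts[p]: p ∈ counts.keys, so getD is exact
          products.insert p (products.getD p [] ++ [(A, counts.getD p 0)]))
        products)
    PySem.Dict.empty).items

-- ===== PRECONDITION & SPEC =====

-- For M < 2 Python raises ValueError (itertools.combinations with a negative r).
def Pre_probability_all_products (N : Int) (M : Int) : Prop := 2 ≤ M
instance (N : Int) (M : Int) : Decidable (Pre_probability_all_products N M) := by
  unfold Pre_probability_all_products; infer_instance

def pvWitness_probability_all_products : Int × Int := (2, 3)

-- For N < 0 with M = 2 the only choice tuple is the degenerate (N,) yielding no products,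
-- where A returns {-1: [((N,), 0)]} — the -1/0 sentinel of its merge loop leaking out —
-- while B returns {}, the intended empty result.
def D_probability_all_products (N : Int) (M : Int) : Prop := N < 0 ∧ M = 2
instance (N : Int) (M : Int) : Decidable (D_probability_all_products N M) := by
  unfold D_probability_all_products; infer_instance

def Spec_probability_all_products (N : Int) (M : Int) (out : List (Int × List (List Int × Int))) : Prop :=
  ¬ D_probability_all_products N M → out = probability_all_products_alt N M
instance (N : Int) (M : Int) (out : List (Int × List (List Int × Int))) :
    Decidable (Spec_probability_all_products N M out) := by
  unfold Spec_probability_all_products; infer_instance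

def pvDiffWitness_probability_all_products : Int × Int := (-1, 2)
def pvDiffWitnessOut_probability_all_products :
    (List (Int × List (List Int × Int))) × (List (Int × List (List Int × Int))) :=
  ([(-1, [([-1], 0)])], [])

-- ===== CLAIM (what is proved, stated in full; the proofs are below) =====
def Claim_unchanged_probability_all_products : Prop := ∀ (N : Int) (M : Int), Dom_probability_all_products N M → Pre_probability_all_products N M → Spec_probability_all_products N M (probability_all_products N M)
def Claim_changed_probability_all_products : Prop := Dom_probability_all_products (pvDiffWitness_probability_all_products.1) (pvDiffWitness_probability_all_products.2) ∧ Pre_probability_all_products (pvDiffWitness_probability_all_products.1) (pvDiffWitness_probability_all_products.2) ∧ D_probability_all_products (pvDiffWitness_probability_all_products.1) (pvDiffWitness_probability_all_products.2) ∧ probability_all_products (pvDiffWitness_probability_all_products.1) (pvDiffWitness_probability_all_products.2) = pvDiffWitnessOut_probability_all_products.1 ∧ probability_all_products_alt (pvDiffWitness_probability_all_products.1) (pvDiffWitness_probability_all_products.2) = pvDiffWitnessOut_probability_all_products.2 ∧ pvDiffWitnessOut_probability_all_products.1 ≠ pvDiffWitnessOut_probability_all_products.2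
def Claim_exact_probability_all_products : Prop := ∀ (N : Int) (M : Int), Dom_probability_all_products N M → Pre_probability_all_products N M → D_probability_all_products N M → probability_all_products N M ≠ probability_all_products_alt N M

-- ===== LEMMAS AND PROOFS =====

-- sum of the frequencies of the pairs with key p
def sumKey (L : List (Int × Int)) (p : Int) : Int := ((L.filter (fun q => q.1 == p)).map Prod.snd).sum

-- adjacent deduplication (what the merge scan does to the sorted key sequence)
def uniqAdj : List Int → List Int
  | [] => []
  | [a] => [a]
  | a :: b :: t => if a = b then uniqAdj (b :: t) else a :: uniqAdj (b :: t)

-- A's merge loop after the first element has seeded the state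
def groups : Int → Int → List (Int × Int) → List (Int × Int)
  | cp, cf, [] => [(cp, cf)]
  | cp, cf, (p, f) :: rest => if p = cp then groups cp (cf + f) rest else (cp, cf) :: groups p f rest

theorem mem_uniqAdj {l : List Int} {x : Int} : x ∈ uniqAdj l ↔ x ∈ l := by
  induction l using uniqAdj.induct with
  | case1 => simp [uniqAdj]
  | case2 a => simp [uniqAdj]
  | case3 a t ih =>
      rw [show uniqAdj (a :: a :: t) = uniqAdj (a :: t) by simp [uniqAdj], ih]; simp
  | case4 a b t hab ih =>
      rw [show uniqAdj (a :: b :: t) = a :: uniqAdj (b :: t) by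
            simp only [uniqAdj]; rw [if_neg hab]]
      rw [List.mem_cons, ih]; simp

theorem pairwise_lt_uniqAdj {l : List Int} (h : l.Pairwise (· ≤ ·)) :
    (uniqAdj l).Pairwise (· < ·) := by
  induction l using uniqAdj.induct with
  | case1 => simp [uniqAdj]
  | case2 a => simp [uniqAdj]
  | case3 a t ih =>
      rcases List.pairwise_cons.mp h with ⟨ha, hbt⟩
      rw [show uniqAdj (a :: a :: t) = uniqAdj (a :: t) by simp [uniqAdj]]
      exact ih hbt
  | case4 a b t hab ih =>
      rcases List.pairwise_cons.mp h with ⟨ha, hbt⟩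
      rw [show uniqAdj (a :: b :: t) = a :: uniqAdj (b :: t) by
            simp only [uniqAdj]; rw [if_neg hab]]
      refine List.pairwise_cons.mpr ⟨?_, ih hbt⟩
      intro y hy
      rcases List.mem_cons.mp (mem_uniqAdj.mp hy) with hyb | hyt
      · exact hyb ▸ lt_of_le_of_ne (ha b (by simp)) hab
      · exact lt_of_lt_of_le (lt_of_le_of_ne (ha b (by simp)) hab)
          ((List.pairwise_cons.mp hbt).1 y hyt)

theorem sumKey_cons (q : Int × Int) (L : List (Int × Int)) (p : Int) :
    sumKey (q :: L) p = (if q.1 = p then q.2 else 0) + sumKey L p := by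
  by_cases h : q.1 = p
  · simp [sumKey, h]
  · simp [sumKey, h]

theorem sumKey_eq_zero {L : List (Int × Int)} {p : Int} (h : ∀ q ∈ L, q.1 ≠ p) :
    sumKey L p = 0 := by
  induction L with
  | nil => rfl
  | cons q L ih =>
      rw [sumKey_cons, if_neg (h q (by simp)), ih (fun r hr => h r (by simp [hr])), add_zero]

theorem sumKey_perm {L L' : List (Int × Int)} (h : L.Perm L') (p : Int) :
    sumKey L p = sumKey L' p := by
  exact ((h.filter _).map _).sum_eq

theorem groups_cons (cp cf : Int) (q : Int × Int) (rest : List (Int × Int)) :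
    groups cp cf (q :: rest)
      = if q.1 = cp then groups cp (cf + q.2) rest else (cp, cf) :: groups q.1 q.2 rest := by
  rcases q with ⟨p, f⟩; rfl

theorem merge_fold_eq_groups (S : List (Int × Int)) :
    ∀ (cp cf : Int) (out : List (Int × Int)), cp ≠ -1 → (∀ q ∈ S, q.1 ≠ -1) →
    ((S.foldl
        (fun (st : Int × Int × List (Int × Int)) pfp =>
          if st.1 = -1 then (pfp.1, pfp.2, st.2.2)
          else if st.1 = pfp.1 then (st.1, st.2.1 + pfp.2, st.2.2)
          else (pfp.1, pfp.2, st.2.2 ++ [(st.1, st.2.1)]))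
        (cp, cf, out)).2.2
      ++ [((S.foldl
        (fun (st : Int × Int × List (Int × Int)) pfp =>
          if st.1 = -1 then (pfp.1, pfp.2, st.2.2)
          else if st.1 = pfp.1 then (st.1, st.2.1 + pfp.2, st.2.2)
          else (pfp.1, pfp.2, st.2.2 ++ [(st.1, st.2.1)]))
        (cp, cf, out)).1,
        (S.foldl
        (fun (st : Int × Int × List (Int × Int)) pfp =>
          if st.1 = -1 then (pfp.1, pfp.2, st.2.2)
          else if st.1 = pfp.1 then (st.1, st.2.1 + pfp.2, st.2.2)
          else (pfp.1, pfp.2, st.2.2 ++ [(st.1, st.2.1)]))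
        (cp, cf, out)).2.1)]) = out ++ groups cp cf S := by
  induction S with
  | nil => intro cp cf out _ _; simp [groups]
  | cons q S ih =>
      intro cp cf out hcp hkeys
      rw [groups_cons]
      simp only [List.foldl_cons]
      rw [if_neg hcp]
      by_cases hq : cp = q.1
      · rw [if_pos hq, if_pos hq.symm]
        exact ih cp (cf + q.2) out hcp (fun r hr => hkeys r (by simp [hr]))
      · rw [if_neg hq, if_neg (fun hh => hq hh.symm)]
        rw [ih q.1 q.2 (out ++ [(cp, cf)]) (hkeys q (by simp))
              (fun r hr => hkeys r (by simp [hr]))]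
        simp

theorem groups_eq (S : List (Int × Int)) :
    ∀ (cp cf : Int), ((cp :: S.map Prod.fst).Pairwise (· ≤ ·)) →
    groups cp cf S
      = (uniqAdj (cp :: S.map Prod.fst)).map
          (fun p => (p, (if p = cp then cf else 0) + sumKey S p)) := by
  induction S with
  | nil => intro cp cf _; simp [groups, uniqAdj, sumKey]
  | cons q S ih =>
      intro cp cf h
      rcases List.pairwise_cons.mp h with ⟨hcple, htail⟩
      have hcpq : cp ≤ q.1 := hcple q.1 (by simp)
      rw [groups_cons]
      by_cases hq : q.1 = cp
      · rw [if_pos hq]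
        have htail' : (cp :: S.map Prod.fst).Pairwise (· ≤ ·) := by
          refine List.pairwise_cons.mpr ⟨?_, (List.pairwise_cons.mp htail).2⟩
          intro y hy; exact hcple y (by simp [hy])
        rw [ih cp (cf + q.2) htail']
        have huniq : uniqAdj (cp :: q.1 :: S.map Prod.fst) = uniqAdj (cp :: S.map Prod.fst) := by
          rw [hq]; simp [uniqAdj]
        simp only [List.map_cons, huniq]
        apply List.map_congr_left
        intro p _
        by_cases hp : p = cp
        · subst hp; simp [sumKey_cons, hq, add_assoc]
        · have hqp : q.1 ≠ p := by rw [hq]; exact fun hc => hp hc.symm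
          simp [hp, sumKey_cons, hqp]
      · have hlt : cp < q.1 := lt_of_le_of_ne hcpq (fun hc => hq hc.symm)
        rw [if_neg hq]
        have huniq : uniqAdj (cp :: q.1 :: S.map Prod.fst)
            = cp :: uniqAdj (q.1 :: S.map Prod.fst) := by
          simp only [uniqAdj]; rw [if_neg (fun hc : cp = q.1 => hq hc.symm)]
        simp only [List.map_cons, huniq]
        rw [ih q.1 q.2 htail]
        congr 1
        · -- head entry
          have hz : sumKey S cp = 0 := by
            apply sumKey_eq_zero
            intro r hr
            have : q.1 ≤ r.1 := (List.pairwise_cons.mp htail).1 r.1 (List.mem_map_of_mem hr)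
            omega
          rw [sumKey_cons, if_neg hq, hz]
          simp
        · apply List.map_congr_left
          intro p hp
          have hpmem : p ∈ q.1 :: S.map Prod.fst := mem_uniqAdj.mp hp
          have hqp : q.1 ≤ p := by
            rcases List.mem_cons.mp hpmem with h1 | h2
            · omega
            · exact (List.pairwise_cons.mp htail).1 p h2
          have hpcp : p ≠ cp := by omega
          rw [sumKey_cons, if_neg hpcp]
          rcases eq_or_ne q.1 p with h1 | h1
          · subst h1; simp
          · simp [h1, Ne.symm h1]

theorem mergeA_eq (L : List (Int × Int)) (hne : L ≠ []) (hpos : ∀ q ∈ L, 1 ≤ q.1) :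
    mergeA L
      = (PySem.List.sorted (PySem.Set.ofList (L.map Prod.fst)) (fun x => x) false).map
          (fun p => (p, sumKey L p)) := by
  have hperm : (PySem.List.sorted L (fun p => p.1) false).Perm L := PySem.List.sorted_perm L _ false
  have hposS : ∀ q ∈ PySem.List.sorted L (fun p => p.1) false, 1 ≤ q.1 :=
    fun q hq => hpos q (hperm.subset hq)
  have hSne : PySem.List.sorted L (fun p => p.1) false ≠ [] := by
    rw [Ne, PySem.List.sorted_eq_nil_iff]; exact hne
  have hpw : ((PySem.List.sorted L (fun p => p.1) false).map Prod.fst).Pairwise (· ≤ ·) := by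
    have := PySem.List.sorted_map_key_pairwise (xs := L) (key := fun p => p.1)
    exact this
  obtain ⟨q0, rest, hS⟩ : ∃ q0 rest, PySem.List.sorted L (fun p => p.1) false = q0 :: rest := by
    cases hSc : PySem.List.sorted L (fun p => p.1) false with
    | nil => exact absurd hSc hSne
    | cons a t => exact ⟨a, t, rfl⟩
  have hq0 : (1 : Int) ≤ q0.1 := hposS q0 (by rw [hS]; simp)
  have hrest : ∀ q ∈ rest, q.1 ≠ -1 := by
    intro q hq
    have := hposS q (by rw [hS]; simp [hq])
    omega
  rw [mergeA]
  simp only [hS, List.foldl_cons, reduceIte]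
  rw [merge_fold_eq_groups rest q0.1 q0.2 [] (by omega) hrest]
  have hpw' : (q0.1 :: rest.map Prod.fst).Pairwise (· ≤ ·) := by
    rw [hS] at hpw; simpa using hpw
  rw [groups_eq rest q0.1 q0.2 hpw', List.nil_append]
  have hkeys : uniqAdj (q0.1 :: rest.map Prod.fst)
      = PySem.List.sorted (PySem.Set.ofList (L.map Prod.fst)) (fun x => x) false := by
    refine (PySem.List.sorted_eq_of_perm_of_pairwise_lt (key := fun x => x) _ _ ?_ ?_).symm
    · -- same members, both nodup
      have hnodup : (uniqAdj (q0.1 :: rest.map Prod.fst)).Nodup :=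
        (pairwise_lt_uniqAdj hpw').imp (fun hab => ne_of_lt hab)
      refine (List.perm_ext_iff_of_nodup hnodup (PySem.Set.nodup_ofList _)).mpr ?_
      intro a
      rw [mem_uniqAdj, PySem.Set.mem_ofList]
      have : a ∈ q0.1 :: rest.map Prod.fst ↔ a ∈ L.map Prod.fst := by
        rw [show q0.1 :: rest.map Prod.fst = (q0 :: rest).map Prod.fst from rfl, ← hS]
        exact (hperm.map Prod.fst).mem_iff
      exact this
    · exact pairwise_lt_uniqAdj hpw'
  rw [hkeys]
  apply List.map_congr_left
  intro p _
  have hsum : (if p = q0.1 then q0.2 else 0) + sumKey rest p = sumKey L p := by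
    rw [← sumKey_perm (hS ▸ hperm : (q0 :: rest).Perm L) p, sumKey_cons]
    by_cases hp : p = q0.1
    · rw [if_pos hp, if_pos hp.symm]
    · rw [if_neg hp, if_neg (fun hc => hp hc.symm)]
  rw [hsum]

theorem getD_foldl_insert_add (l : List (Int × Int)) :
    ∀ (d : PySem.Dict Int Int) (v : Int),
    (l.foldl (fun d q => d.insert q.1 (d.getD q.1 0 + q.2)) d).getD v 0
      = d.getD v 0 + sumKey l v := by
  induction l with
  | nil => intro d v; simp [sumKey]
  | cons q l ih =>
      intro d v
      simp only [List.foldl_cons]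
      rw [ih, sumKey_cons, PySem.Dict.getD_insert]
      by_cases hv : v = q.1
      · subst hv; simp; ring
      · rw [if_neg hv, if_neg (fun hc => hv hc.symm)]; ring

theorem mem_pyProd_length {ls : List (List Int)} {ys : List Int} (h : ys ∈ pyProd ls) :
    ys.length = ls.length := by
  induction ls generalizing ys with
  | nil => simp [pyProd] at h; simp [h]
  | cons l ls ih =>
      simp only [pyProd, List.mem_flatMap, List.mem_map] at h
      obtain ⟨x, hx, zs, hzs, rfl⟩ := h
      simp [ih hzs]

theorem mem_pyProd_forall₂ {ls : List (List Int)} {ys : List Int} (h : ys ∈ pyProd ls) :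
    List.Forall₂ (· ∈ ·) ys ls := by
  induction ls generalizing ys with
  | nil => simp [pyProd] at h; simp [h]
  | cons l ls ih =>
      simp only [pyProd, List.mem_flatMap, List.mem_map] at h
      obtain ⟨x, hx, zs, hzs, rfl⟩ := h
      exact List.Forall₂.cons hx (ih hzs)

theorem pyProd_ne_nil {ls : List (List Int)} (h : ∀ l ∈ ls, l ≠ []) : pyProd ls ≠ [] := by
  induction ls with
  | nil => simp [pyProd]
  | cons l ls ih =>
      obtain ⟨x, hx⟩ := List.exists_mem_of_ne_nil l (h l (by simp))
      obtain ⟨m, hm⟩ := List.exists_mem_of_ne_nil _ (ih (fun l' hl' => h l' (by simp [hl'])))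
      exact List.ne_nil_of_mem
        (List.mem_flatMap.mpr ⟨x, hx, List.mem_map_of_mem hm⟩)

theorem factdiv_eq_comb {x y : Int} (h0 : 0 ≤ y) (hxy : y ≤ x) :
    PySem.Int.floordiv (PySem.Int.floordiv (pyFact x) (pyFact y)) (pyFact (x - y)) = pyComb x y := by
  have hk : y.toNat ≤ x.toNat := by omega
  have hsub : (x - y).toNat = x.toNat - y.toNat := by omega
  rw [pyFact, pyFact, pyFact, pyComb, hsub]
  rw [PySem.Int.floordiv_natCast, PySem.Int.floordiv_natCast]
  congr 1
  have h1 : Nat.factorial x.toNat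
      = x.toNat.choose y.toNat * Nat.factorial (x.toNat - y.toNat) * Nat.factorial y.toNat := by
    rw [← Nat.choose_mul_factorial_mul_factorial hk]; ring
  rw [Nat.div_eq_of_eq_mul_left (Nat.factorial_pos _) h1,
      Nat.mul_div_cancel _ (Nat.factorial_pos _)]

theorem pair_fold_eq (l : List (Int × Int)) :
    ∀ (k : Int) (pf : Int × Int), 0 ≤ k → (∀ q ∈ l, 0 ≤ q.1 ∧ q.1 ≤ q.2) →
    ((PySem.List.pyRange (k + 2) (k + 2 + l.length) 1).zip l).foldl
      (fun pf ayx =>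
        (pf.1 * ayx.1 ^ ayx.2.1.toNat,
         pf.2 * PySem.Int.floordiv (PySem.Int.floordiv (pyFact ayx.2.2) (pyFact ayx.2.1))
                  (pyFact (ayx.2.2 - ayx.2.1)))) pf
      = (PySem.List.enumerate l k).foldl
          (fun pf iyx => (pf.1 * (iyx.1 + 2) ^ iyx.2.1.toNat, pf.2 * pyComb iyx.2.2 iyx.2.1)) pf := by
  induction l with
  | nil =>
      intro k pf hk hq
      rw [PySem.List.pyRange_one_eq_nil (by simp)]
      simp [PySem.List.enumerate]
  | cons q l ih =>
      intro k pf hk hq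
      rw [PySem.List.pyRange_one_cons (by simp only [List.length_cons]; push_cast; omega)]
      rw [PySem.List.enumerate_cons]
      simp only [List.zip_cons_cons, List.foldl_cons]
      rw [factdiv_eq_comb (hq q (by simp)).1 (hq q (by simp)).2]
      have hrange : k + 2 + ((q :: l).length : Int) = (k + 1) + 2 + (l.length : Int) := by
        simp; ring
      rw [show (k + 2) + 1 = (k + 1) + 2 by ring, hrange]
      exact ih (k + 1) _ (by omega) (fun r hr => hq r (by simp [hr]))

theorem enum_fold_fst_pos (l : List (Int × Int)) :
    ∀ (k : Int) (pf : Int × Int), 0 ≤ k → 1 ≤ pf.1 →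
    1 ≤ ((PySem.List.enumerate l k).foldl
          (fun pf iyx => (pf.1 * (iyx.1 + 2) ^ iyx.2.1.toNat, pf.2 * pyComb iyx.2.2 iyx.2.1)) pf).1 := by
  induction l with
  | nil => intro k pf _ hpf; simpa [PySem.List.enumerate] using hpf
  | cons q l ih =>
      intro k pf hk hpf
      rw [PySem.List.enumerate_cons]
      simp only [List.foldl_cons]
      refine ih (k + 1) _ (by omega) ?_
      have hpow : (1 : Int) ≤ (k + 2) ^ q.1.toNat := one_le_pow₀ (by omega)
      calc (1 : Int) = 1 * 1 := by ring
        _ ≤ pf.1 * (k + 2) ^ q.1.toNat :=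
            mul_le_mul hpf hpow (by norm_num) (le_trans zero_le_one hpf)

theorem pairwise_zip_tail {α : Type} {r : α → α → Prop} {l : List α} (h : l.Pairwise r) :
    ∀ q ∈ l.zip l.tail, r q.1 q.2 := by
  induction l with
  | nil => simp
  | cons a l ih =>
      cases l with
      | nil => simp
      | cons b t =>
          intro q hq
          rcases List.mem_cons.mp (by simpa [List.zip_cons_cons] using hq) with h1 | h2
          · subst h1; exact (List.pairwise_cons.mp h).1 b (by simp)
          · exact ih (List.pairwise_cons.mp h).2 q h2

theorem pyCombinations_eq (xs : List Int) (r : Nat) :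
    pyCombinations xs r = PySem.List.combinations xs r := by
  induction xs generalizing r with
  | nil =>
      cases r with
      | zero => simp [pyCombinations, PySem.List.combinations_zero]
      | succ r => simp [pyCombinations, PySem.List.combinations_nil_succ]
  | cons x t ih =>
      cases r with
      | zero => simp [pyCombinations, PySem.List.combinations_zero]
      | succ r =>
          rw [pyCombinations, PySem.List.combinations_cons_succ, ih, ih]
          split_ifs with h
          · rw [PySem.List.combinations_eq_nil_of_length_lt t (show t.length < r by omega),
                PySem.List.combinations_eq_nil_of_length_lt t (show t.length < r + 1 by omega)]
            simp
          · rfl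

theorem zip_mem_of_forall₂ {ys A : List Int} {f : Int → List Int}
    (h : List.Forall₂ (· ∈ ·) ys (A.map f)) : ∀ q ∈ ys.zip A, q.1 ∈ f q.2 := by
  induction A generalizing ys with
  | nil => cases h; simp
  | cons x A ih =>
      rw [List.map_cons] at h
      cases h with
      | cons hy htail =>
          intro q hq
          rcases List.mem_cons.mp (by simpa [List.zip_cons_cons] using hq) with h1 | h2
          · subst h1; exact hy
          · exact ih htail q h2

theorem basePairsA_eq (A : List Int) :
    basePairsA A = (pyProd (A.map (fun x => PySem.List.pyRange 0 (x + 1) 1))).map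
      (fun ys => (PySem.List.enumerate (ys.zip A) 0).foldl
          (fun pf iyx => (pf.1 * (iyx.1 + 2) ^ iyx.2.1.toNat, pf.2 * pyComb iyx.2.2 iyx.2.1))
          (1, 1)) := by
  rw [basePairsA]
  apply List.map_congr_left
  intro ys hys
  have hlen : ys.length = A.length := by
    rw [mem_pyProd_length hys, List.length_map]
  have hcond : ∀ q ∈ ys.zip A, 0 ≤ q.1 ∧ q.1 ≤ q.2 := by
    intro q hq
    have := zip_mem_of_forall₂ (mem_pyProd_forall₂ hys) q hq
    rw [PySem.List.mem_pyRange_one] at this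
    omega
  have hM : ((A.map (fun xi => PySem.List.pyRange 0 (xi + 1) 1)).length : Int) + 1 + 1
      = 0 + 2 + ((ys.zip A).length : Int) := by
    simp [List.length_zip, hlen]
    ring
  rw [hM, show (2 : Int) = 0 + 2 from by ring]
  exact pair_fold_eq (ys.zip A) 0 (1, 1) le_rfl hcond

-- folding the merged pairs into the outer dict = folding the sorted distinct products
theorem dict_loop_eq (A : List Int) (base : List (Int × Int)) (hbne : base ≠ [])
    (hpos : ∀ q ∈ base, 1 ≤ q.1) (products : PySem.Dict Int (List (List Int × Int))) :
    (mergeA base).foldl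
      (fun products pfp =>
        let products := if products.contains pfp.1 then products else products.insert pfp.1 []
        products.insert pfp.1 (products.getD pfp.1 [] ++ [(A, pfp.2)]))
      products
    = (PySem.List.sorted (PySem.Set.ofList (base.map Prod.fst)) (fun x => x) false).foldl
        (fun products p =>
          let products := products.setdefault p []
          products.insert p (products.getD p [] ++ [(A, sumKey base p)]))
        products := by
  rw [mergeA_eq base hbne hpos, List.foldl_map]
  apply PySem.List.foldl_congr_mem
  intro acc p _
  simp only []
  by_cases hc : acc.contains p = true
  · rw [if_pos hc, PySem.Dict.setdefault_of_contains acc ([] : List (List Int × Int)) hc]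
  · rw [if_neg (by simpa using hc),
        PySem.Dict.setdefault_of_not_contains acc ([] : List (List Int × Int)) (by simpa using hc)]

-- the per-partition inner loops agree when every entry of A is nonnegative
theorem inner_eq (A : List Int) (hA : ∀ x ∈ A, 0 ≤ x)
    (products : PySem.Dict Int (List (List Int × Int))) :
    (mergeA (basePairsA A)).foldl
      (fun products pfp =>
        let products := if products.contains pfp.1 then products else products.insert pfp.1 []
        products.insert pfp.1 (products.getD pfp.1 [] ++ [(A, pfp.2)]))
      products
    = (let counts := (pyProd (A.map (fun x => PySem.List.pyRange 0 (x + 1) 1))).foldl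
          (fun (counts : PySem.Dict Int Int) ys =>
            let pf := (PySem.List.enumerate (ys.zip A) 0).foldl
              (fun pf iyx => (pf.1 * (iyx.1 + 2) ^ iyx.2.1.toNat, pf.2 * pyComb iyx.2.2 iyx.2.1))
              (1, 1)
            counts.insert pf.1 (counts.getD pf.1 0 + pf.2))
          PySem.Dict.empty
       (PySem.List.sorted counts.keys (fun x => x) false).foldl
        (fun products p =>
          let products := products.setdefault p []
          products.insert p (products.getD p [] ++ [(A, counts.getD p 0)]))
        products) := by
  simp only []
  rw [basePairsA_eq A]
  -- the weighted-count dict: keys and lookups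
  have hkeys : ((pyProd (A.map (fun x => PySem.List.pyRange 0 (x + 1) 1))).foldl
      (fun (counts : PySem.Dict Int Int) ys =>
        counts.insert
          ((PySem.List.enumerate (ys.zip A) 0).foldl
            (fun pf iyx => (pf.1 * (iyx.1 + 2) ^ iyx.2.1.toNat, pf.2 * pyComb iyx.2.2 iyx.2.1))
            (1, 1)).1
          (counts.getD
            ((PySem.List.enumerate (ys.zip A) 0).foldl
              (fun pf iyx => (pf.1 * (iyx.1 + 2) ^ iyx.2.1.toNat, pf.2 * pyComb iyx.2.2 iyx.2.1))
              (1, 1)).1 0 +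
            ((PySem.List.enumerate (ys.zip A) 0).foldl
              (fun pf iyx => (pf.1 * (iyx.1 + 2) ^ iyx.2.1.toNat, pf.2 * pyComb iyx.2.2 iyx.2.1))
              (1, 1)).2))
      PySem.Dict.empty).keys
      = PySem.Set.ofList
          (((pyProd (A.map (fun x => PySem.List.pyRange 0 (x + 1) 1))).map
            (fun ys => (PySem.List.enumerate (ys.zip A) 0).foldl
              (fun pf iyx => (pf.1 * (iyx.1 + 2) ^ iyx.2.1.toNat, pf.2 * pyComb iyx.2.2 iyx.2.1))
              (1, 1))).map Prod.fst) := by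
    rw [PySem.Dict.keys_foldl_insert_key]
    rw [PySem.Dict.keys_empty, PySem.Set.update_nil_left, List.map_map]
    rfl
  rw [hkeys]
  have hc : ((pyProd (A.map (fun x => PySem.List.pyRange 0 (x + 1) 1))).foldl
      (fun (counts : PySem.Dict Int Int) ys =>
        counts.insert
          ((PySem.List.enumerate (ys.zip A) 0).foldl
            (fun pf iyx => (pf.1 * (iyx.1 + 2) ^ iyx.2.1.toNat, pf.2 * pyComb iyx.2.2 iyx.2.1))
            (1, 1)).1
          (counts.getD
            ((PySem.List.enumerate (ys.zip A) 0).foldl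
              (fun pf iyx => (pf.1 * (iyx.1 + 2) ^ iyx.2.1.toNat, pf.2 * pyComb iyx.2.2 iyx.2.1))
              (1, 1)).1 0 +
            ((PySem.List.enumerate (ys.zip A) 0).foldl
              (fun pf iyx => (pf.1 * (iyx.1 + 2) ^ iyx.2.1.toNat, pf.2 * pyComb iyx.2.2 iyx.2.1))
              (1, 1)).2))
      PySem.Dict.empty)
      = (((pyProd (A.map (fun x => PySem.List.pyRange 0 (x + 1) 1))).map
          (fun ys => (PySem.List.enumerate (ys.zip A) 0).foldl
            (fun pf iyx => (pf.1 * (iyx.1 + 2) ^ iyx.2.1.toNat, pf.2 * pyComb iyx.2.2 iyx.2.1))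
            (1, 1))).foldl
          (fun (d : PySem.Dict Int Int) q => d.insert q.1 (d.getD q.1 0 + q.2))
          PySem.Dict.empty) :=
    (List.foldl_map
      (f := fun (ys : List Int) => (PySem.List.enumerate (ys.zip A) 0).foldl
        (fun (pf : Int × Int) (iyx : Int × Int × Int) =>
          (pf.1 * (iyx.1 + 2) ^ iyx.2.1.toNat, pf.2 * pyComb iyx.2.2 iyx.2.1))
        ((1, 1) : Int × Int))
      (g := fun (d : PySem.Dict Int Int) (q : Int × Int) =>
        d.insert q.1 (d.getD q.1 0 + q.2))).symm
  rw [hc]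
  have hget : ∀ p : Int,
      (((pyProd (A.map (fun x => PySem.List.pyRange 0 (x + 1) 1))).map
          (fun ys => (PySem.List.enumerate (ys.zip A) 0).foldl
            (fun pf iyx => (pf.1 * (iyx.1 + 2) ^ iyx.2.1.toNat, pf.2 * pyComb iyx.2.2 iyx.2.1))
            (1, 1))).foldl
          (fun (d : PySem.Dict Int Int) q => d.insert q.1 (d.getD q.1 0 + q.2))
          PySem.Dict.empty).getD p 0
        = sumKey ((pyProd (A.map (fun x => PySem.List.pyRange 0 (x + 1) 1))).map
            (fun ys => (PySem.List.enumerate (ys.zip A) 0).foldl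
              (fun pf iyx => (pf.1 * (iyx.1 + 2) ^ iyx.2.1.toNat, pf.2 * pyComb iyx.2.2 iyx.2.1))
              (1, 1))) p := by
    intro p
    rw [getD_foldl_insert_add]
    simp [PySem.Dict.getD_empty]
  simp only [hget]
  have hlne : pyProd (A.map (fun x => PySem.List.pyRange 0 (x + 1) 1)) ≠ [] := by
    apply pyProd_ne_nil
    intro l' hl'
    rcases List.mem_map.mp hl' with ⟨x, hx, rfl⟩
    rw [PySem.List.pyRange_one_cons (by have := hA x hx; omega)]
    simp
  apply dict_loop_eq
  · intro hcon
    exact hlne (List.map_eq_nil_iff.mp hcon)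
  · intro q hq
    rcases List.mem_map.mp hq with ⟨ys, _, rfl⟩
    exact enum_fold_fst_pos (ys.zip A) 0 (1, 1) le_rfl le_rfl

theorem bars_entries_nonneg {N M : Int} (hpre : 2 ≤ M) (hnd : ¬ (N < 0 ∧ M = 2))
    {bars : List Int}
    (hb : bars ∈ pyCombinations (PySem.List.pyRange 1 (N + M - 1) 1) (M - 2).toNat) :
    ∀ x ∈ (([0] ++ bars ++ [N + M - 1]).zip ([0] ++ bars ++ [N + M - 1]).tail).map
        (fun (xy : Int × Int) => xy.2 - xy.1 - 1), 0 ≤ x := by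
  rw [pyCombinations_eq] at hb
  rcases (PySem.List.mem_combinations_iff _ _ _).mp hb with ⟨hsub, hlen⟩
  have hmem : ∀ x ∈ bars, 1 ≤ x ∧ x < N + M - 1 := by
    intro x hx
    exact (PySem.List.mem_pyRange_one).mp (hsub.subset hx)
  have hpw : bars.Pairwise (· < ·) :=
    (PySem.List.pairwise_lt_pyRange_one 1 (N + M - 1)).sublist hsub
  have hb0 : (0 : Int) < N + M - 1 := by
    cases bars with
    | nil =>
        have : (M - 2).toNat = 0 := by simpa using hlen.symm
        have hM2 : M = 2 := by omega
        rcases not_and_or.mp hnd with hN | hM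
        · omega
        · exact absurd hM2 hM
    | cons x t =>
        have := hmem x (by simp)
        omega
  have hall : (([0] ++ bars ++ [N + M - 1]) : List Int).Pairwise (· < ·) := by
    rw [List.pairwise_append]
    refine ⟨?_, ?_, ?_⟩
    · rw [List.pairwise_append]
      refine ⟨by simp, hpw, ?_⟩
      intro a ha b hb
      simp at ha hb
      subst ha
      exact (hmem b hb).1.trans_lt' (by omega)
    · simp
    · intro a ha b hb
      simp at ha hb
      subst hb
      rcases ha with ha | ha
      · omega
      · exact (hmem a ha).2
  intro x hx
  rcases List.mem_map.mp hx with ⟨q, hq, rfl⟩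
  have := pairwise_zip_tail hall q hq
  omega

-- ===== VERDICT (by name: the statement is the Claim_ definition above) =====
theorem probability_all_products_spec : Claim_unchanged_probability_all_products := by
  intro N M hdom hpre hnd
  show probability_all_products N M = probability_all_products_alt N M
  unfold probability_all_products probability_all_products_alt choicesA
  rw [List.foldl_map]
  congr 1
  apply PySem.List.foldl_congr_mem
  intro products bars hbars
  have hAlist : (((([0] : List Int) ++ bars ++ [N + M - 1]).zip (([0] : List Int) ++ bars ++ [N + M - 1]).tail).map
        (fun (xy : Int × Int) => xy.2 - xy.1)).map (fun y => y - 1)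
      = ((([0] : List Int) ++ bars ++ [N + M - 1]).zip (([0] : List Int) ++ bars ++ [N + M - 1]).tail).map
        (fun (xy : Int × Int) => xy.2 - xy.1 - 1) := by
    rw [List.map_map]; rfl
  rw [hAlist]
  exact inner_eq _ (bars_entries_nonneg hpre hnd hbars) products

theorem probability_all_products_changed : Claim_changed_probability_all_products := by
  unfold Claim_changed_probability_all_products; decide

theorem probability_all_products_tight : Claim_exact_probability_all_products := by
  intro N M hdom hpre hd
  obtain ⟨hN, hM⟩ := hd
  subst hM
  have h1 : PySem.List.pyRange 0 (N + 1) 1 = [] :=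
    PySem.List.pyRange_one_eq_nil (by omega)
  have e1 : N + 2 - 1 - 0 - 1 = N := by ring
  have e2 : N + 2 - 1 - 1 = N := by ring
  have e3 : N + 2 - 1 - 0 = N + 1 := by ring
  have hA : probability_all_products N 2 = [(-1, [([N], 0)])] := by
    simp [probability_all_products, choicesA, basePairsA, mergeA, pyProd, h1,
          pyCombinations, PySem.List.sorted,
          PySem.Dict.insert, PySem.Dict.empty, PySem.Dict.contains, PySem.Dict.getD,
          PySem.Dict.get?,
          List.foldl_cons, List.foldl_nil, List.any_nil, List.any_cons,
          e3]
  have hB : probability_all_products_alt N 2 = [] := by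
    simp [probability_all_products_alt, pyProd, h1,
          pyCombinations, PySem.List.sorted,
          PySem.Dict.insert, PySem.Dict.empty, PySem.Dict.contains, PySem.Dict.getD,
          PySem.Dict.get?, PySem.Dict.keys, PySem.Dict.setdefault,
          List.foldl_cons, List.foldl_nil,
          e3]
  rw [hA, hB]
  simp
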